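-- pv_equiv track=rewrite | github.com/angryscan/angryscan.org | scripts/translate_docs.py | find_table_ranges
-- ===== SOURCE A (Python) =====
-- from typing import Iterable, Iterator, List, Tuple
--
-- def is_table_line(line: str) -> bool:
--     """Check if a line is part of a markdown table."""
--     stripped = line.strip()
--     # Table line should start and end with | or contain | with proper spacing
--     return stripped.startswith('|') and stripped.endswith('|') and '|' in stripped[1:-1]
--
-- def find_table_ranges(lines: List[str]) -> List[Tuple[int, int]]:
--     """
--     Find all table ranges in lines.
--     Returns list of (start_index, end_index) tuples.
--     """
--     table_ranges = []
--     i = 0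
--     while i < len(lines):
--         if is_table_line(lines[i]):
--             start = i
--             # Find the end of the table
--             i += 1
--             while i < len(lines) and is_table_line(lines[i]):
--                 i += 1
--             end = i
--             # Only include if we have at least 2 lines (header + separator)
--             if end - start >= 2:
--                 table_ranges.append((start, end))
--         else:
--             i += 1
--     return table_ranges
-- ===== SOURCE B (Python) =====
-- from typing import List, Tuple
--
--
-- def is_table_line(line: str) -> bool:
--     """Check if a line is part of a markdown table."""
--     stripped = line.strip()
--     return stripped.startswith('|') and stripped.endswith('|') and '|' in stripped[1:-1]
--
--
-- def find_table_ranges(lines: List[str]) -> List[Tuple[int, int]]: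
--     """
--     Find all table ranges in lines.
--     Returns list of (start_index, end_index) tuples.
--
--     Two-pass: build a boolean mask, then scan it for True-run transitions.
--     """
--     flags = [is_table_line(line) for line in lines]
--     ranges = []
--     start = 0
--     prev = False
--     for i, f in enumerate(flags):
--         if f and not prev:
--             start = i
--         if (not f) and prev:
--             if i - start >= 2:
--                 ranges.append((start, i))
--         prev = f
--     if prev and len(flags) - start >= 2:
--         ranges.append((start, len(flags)))
--     return ranges
-- ===== Notes on version B (the rewrite author's own statement) =====
-- stated objective: alternative
-- what changed: A's nested index-advancing while loops (inner loop scans to the end of each table run) are replaced by a two-pass decomposition: first map every line to a boolean table-line mask, then a single enumerate/fold transition scan over the mask that records a run start on a False-to-True edge and emits (start, i) on a True-to-False edge or at end-of-list, keeping the >= 2 length filter.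
import Mathlib
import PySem

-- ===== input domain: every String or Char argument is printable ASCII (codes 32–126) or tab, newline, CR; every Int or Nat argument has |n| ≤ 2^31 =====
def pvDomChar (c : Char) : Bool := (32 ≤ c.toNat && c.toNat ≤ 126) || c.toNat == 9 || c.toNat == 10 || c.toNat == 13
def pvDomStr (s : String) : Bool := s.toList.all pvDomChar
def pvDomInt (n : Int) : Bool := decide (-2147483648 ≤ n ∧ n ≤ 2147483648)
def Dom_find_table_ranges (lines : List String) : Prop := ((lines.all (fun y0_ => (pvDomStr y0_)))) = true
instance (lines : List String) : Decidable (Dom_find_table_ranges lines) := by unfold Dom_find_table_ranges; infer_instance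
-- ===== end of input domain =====

-- B replaces A's nested index-advancing while loops by a two-pass mask-then-transition scan; objective: alternative decomposition (same O(n) cost).

-- ===== PORT A =====
def is_table_line (line : String) : Bool :=
  let stripped := PySem.Str.strip line
  PySem.Str.startswith stripped "|" && PySem.Str.endswith stripped "|" &&
    PySem.Str.isIn "|" (PySem.Str.slice stripped (some 1) (some (-1)))

-- inner 'while i < len(lines) and is_table_line(lines[i]): i += 1'
def innerWhile (lines : List String) (i : Nat) : Nat :=
  if h : i < lines.length then
    if is_table_line lines[i] then innerWhile lines (i + 1) else i
  else i
termination_by lines.length - i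
decreasing_by omega

theorem innerWhile_ge (lines : List String) (i : Nat) : i ≤ innerWhile lines i := by
  rw [innerWhile]
  split
  next h =>
    split
    next => exact Nat.le_trans (Nat.le_succ i) (innerWhile_ge lines (i + 1))
    next => exact Nat.le_refl i
  next => exact Nat.le_refl i
termination_by lines.length - i
decreasing_by omega

-- outer 'while i < len(lines): …'
def outerLoop (lines : List String) (i : Nat) (acc : List (Int × Int)) : List (Int × Int) :=
  if h : i < lines.length then
    if is_table_line lines[i] then
      -- start := i; e := innerWhile(lines, i+1); append (start, e) if e - start >= 2; i := e
      outerLoop lines (innerWhile lines (i + 1))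
        (if ((innerWhile lines (i + 1) : Int)) - (i : Int) ≥ 2 then
          acc ++ [((i : Int), (innerWhile lines (i + 1) : Int))] else acc)
    else outerLoop lines (i + 1) acc
  else acc
termination_by lines.length - i
decreasing_by
  · have hge := innerWhile_ge lines (i + 1); omega
  · omega

def find_table_ranges (lines : List String) : List (Int × Int) :=
  outerLoop lines 0 []

-- ===== PORT B =====
-- one step of Source B's transition scan over (index, flag) pairs
def bStep (st : List (Int × Int) × Int × Bool) (p : Int × Bool) : List (Int × Int) × Int × Bool :=
  let ranges := st.1
  let start := st.2.1
  let prev := st.2.2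
  let i := p.1
  let f := p.2
  let start := if f && !prev then i else start
  let ranges := if !f && prev then (if i - start ≥ 2 then ranges ++ [(start, i)] else ranges) else ranges
  (ranges, start, f)

def find_table_ranges_alt (lines : List String) : List (Int × Int) :=
  let flags := lines.map is_table_line
  let st := (PySem.List.enumerate flags 0).foldl bStep ([], 0, false)
  if st.2.2 && (flags.length : Int) - st.2.1 ≥ 2 then st.1 ++ [(st.2.1, (flags.length : Int))] else st.1

-- ===== PRECONDITION & SPEC =====
def Spec_find_table_ranges (lines : List String) (out : List (Int × Int)) : Prop := out = find_table_ranges_alt lines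
instance (lines : List String) (out : List (Int × Int)) : Decidable (Spec_find_table_ranges lines out) := by unfold Spec_find_table_ranges; infer_instance

-- ===== CLAIM (what is proved, stated in full; the proofs are below) =====
def Claim_equal_find_table_ranges : Prop := ∀ (lines : List String), Dom_find_table_ranges lines → Spec_find_table_ranges lines (find_table_ranges lines)

-- ===== LEMMAS AND PROOFS =====

-- length of the leading run of `true`s
def runLen : List Bool → Nat
  | true :: r => runLen r + 1
  | _ => 0

-- final flush of Source B (N = total number of lines)
def fl (N : Int) (st : List (Int × Int) × Int × Bool) : List (Int × Int) :=
  if st.2.2 && N - st.2.1 ≥ 2 then st.1 ++ [(st.2.1, N)] else st.1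

theorem innerWhile_le (lines : List String) (i : Nat) (h : i ≤ lines.length) :
    innerWhile lines i ≤ lines.length := by
  rw [innerWhile]
  split
  next h1 =>
    split
    next => exact innerWhile_le lines (i + 1) h1
    next => omega
  next => omega
termination_by lines.length - i
decreasing_by omega

theorem innerWhile_eq (lines : List String) (i : Nat) (h : i ≤ lines.length) :
    innerWhile lines i = i + runLen ((lines.map is_table_line).drop i) := by
  rw [innerWhile]
  split
  next h1 =>
    have hd : (lines.map is_table_line).drop i
        = is_table_line lines[i] :: (lines.map is_table_line).drop (i + 1) := by
      rw [List.drop_eq_getElem_cons (by simpa using h1)]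
      simp
    rw [hd]
    split
    next hf =>
      rw [innerWhile_eq lines (i + 1) h1, hf]
      simp [runLen]; omega
    next hf =>
      simp at hf
      rw [hf]; simp [runLen]
  next h1 =>
    have : i = lines.length := by omega
    subst this
    simp [runLen, List.drop_of_length_le]
termination_by lines.length - i
decreasing_by omega

-- fold with prev = true: the run from offset j is consumed, the range is flushed, and the scan resumes with prev = false
theorem foldT (fs : List Bool) (j s : Int) (acc : List (Int × Int)) (N : Int)
    (hN : N = j + fs.length) :
    fl N ((PySem.List.enumerate fs j).foldl bStep (acc, s, true))
      = fl N ((PySem.List.enumerate (fs.drop (runLen fs)) (j + runLen fs)).foldl bStep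
          ((if (j + (runLen fs : Int)) - s ≥ 2 then acc ++ [(s, j + runLen fs)] else acc), s, false)) := by
  induction fs generalizing j acc with
  | nil =>
    simp [runLen, PySem.List.enumerate_nil, fl] at *
    subst hN
    rfl
  | cons b r ih =>
    cases b with
    | true =>
      rw [PySem.List.enumerate_cons]
      show fl N ((PySem.List.enumerate r (j + 1)).foldl bStep (bStep (acc, s, true) (j, true))) = _
      have hb : bStep (acc, s, true) (j, true) = (acc, s, true) := by simp [bStep]
      rw [hb, ih (j + 1) acc (by simp at hN ⊢; omega)]
      have h1 : (j + 1) + (runLen r : Int) = j + (runLen (true :: r) : Int) := by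
        simp [runLen]; omega
      rw [show runLen (true :: r) = runLen r + 1 from rfl]
      norm_num [Int.add_assoc, Int.add_comm 1 (runLen r : Int)]
    | false =>
      simp only [show runLen (false :: r) = 0 from rfl, Nat.cast_zero, List.drop_zero,
        Int.add_zero]
      rw [PySem.List.enumerate_cons]
      simp only [List.foldl_cons]
      have hb1 : bStep (acc, s, true) (j, false)
          = ((if j - s ≥ 2 then acc ++ [(s, j)] else acc), s, false) := by
        simp [bStep]
      have hb2 : bStep ((if j - s ≥ 2 then acc ++ [(s, j)] else acc), s, false) (j, false)
          = ((if j - s ≥ 2 then acc ++ [(s, j)] else acc), s, false) := by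
        simp [bStep]
      rw [hb1, hb2]

-- main invariant: A's outer loop from index i = Source B's scan over the remaining flags with prev = false
theorem mainInv (lines : List String) (i : Nat) (acc : List (Int × Int)) (s : Int)
    (h : i ≤ lines.length) :
    outerLoop lines i acc
      = fl (lines.length : Int)
          ((PySem.List.enumerate ((lines.map is_table_line).drop i) (i : Int)).foldl bStep (acc, s, false)) := by
  rw [outerLoop]
  split
  next h1 =>
    have hd : (lines.map is_table_line).drop i
        = is_table_line lines[i] :: (lines.map is_table_line).drop (i + 1) := by
      rw [List.drop_eq_getElem_cons (by simpa using h1)]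
      simp
    split
    next hf =>
      -- flag true: run starts at i
      have hb : bStep (acc, s, false) ((i : Int), is_table_line lines[i]) = (acc, (i : Int), true) := by
        simp [bStep, hf]
      rw [hd, PySem.List.enumerate_cons]
      simp only [List.foldl_cons]
      rw [hb]
      have hE := innerWhile_eq lines (i + 1) h1
      have hle : innerWhile lines (i + 1) ≤ lines.length := innerWhile_le lines (i + 1) h1
      rw [foldT ((lines.map is_table_line).drop (i + 1)) ((i : Int) + 1) (i : Int) acc
        (lines.length : Int) (by simp; omega)]
      have he : ((i : Int) + 1) + (runLen ((lines.map is_table_line).drop (i + 1)) : Int)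
          = ((innerWhile lines (i + 1) : Int)) := by
        rw [hE]; push_cast; omega
      rw [he]
      have hdrop : ((lines.map is_table_line).drop (i + 1)).drop
            (runLen ((lines.map is_table_line).drop (i + 1)))
          = (lines.map is_table_line).drop (innerWhile lines (i + 1)) := by
        rw [List.drop_drop, hE]
      rw [hdrop]
      exact mainInv lines (innerWhile lines (i + 1)) _ (i : Int) hle
    next hf =>
      -- flag false
      simp only [Bool.not_eq_true] at hf
      have hb : bStep (acc, s, false) ((i : Int), is_table_line lines[i]) = (acc, s, false) := by
        simp [bStep, hf]
      rw [hd, PySem.List.enumerate_cons]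
      simp only [List.foldl_cons]
      rw [hb, mainInv lines (i + 1) acc s h1]
      norm_num
  next h1 =>
    have : i = lines.length := by omega
    subst this
    simp [List.drop_of_length_le, PySem.List.enumerate_nil, fl]
termination_by lines.length - i
decreasing_by
  · omega
  · omega

-- ===== VERDICT (by name: the statement is the Claim_ definition above) =====
theorem find_table_ranges_spec : Claim_equal_find_table_ranges := by
  intro lines _
  unfold Spec_find_table_ranges find_table_ranges find_table_ranges_alt
  rw [mainInv lines 0 [] 0 (by omega)]
  simp [fl]
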